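-- pv_equiv track=rewrite | github.com/boomanaiden154/spack-license-utils | lint.py | validate_license
-- ===== SOURCE A (Python) =====
-- def validate_license(spdx_expression, license_map):
--   spdx_expression = spdx_expression.replace('(', '').replace(')', '')
--   removed_and_parts = [
--       removed_and.strip() for removed_and in spdx_expression.split('AND')
--   ]
--   removed_or_parts = []
--
--   for removed_and_part in removed_and_parts:
--     removed_or_parts.extend(
--         [removed_or.strip() for removed_or in removed_and_part.split('OR')])
--
--   for spdx_id in removed_or_parts:
--     if spdx_id == 'custom':
--       continue
--     if spdx_id not in license_map:
--       return False
--
--   return True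
-- ===== SOURCE B (Python) =====
-- def validate_license(spdx_expression, license_map):
--   # Single-pass scanner: walk the parenthesis-free expression once, cutting a
--   # token at each literal 'AND'/'OR' and validating it immediately (no
--   # intermediate token lists).
--   expr = spdx_expression.replace('(', '').replace(')', '')
--   tok_start = 0
--   i = 0
--   n = len(expr)
--   while i < n:
--     if expr.startswith('AND', i):
--       width = 3
--     elif expr.startswith('OR', i):
--       width = 2
--     else:
--       i += 1
--       continue
--     tok = expr[tok_start:i].strip()
--     if tok != 'custom' and tok not in license_map:
--       return False
--     i += width
--     tok_start = i
--   tok = expr[tok_start:].strip()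
--   return tok == 'custom' or tok in license_map
-- ===== Notes on version B (the rewrite author's own statement) =====
-- stated objective: alternative
-- what changed: Replaced A's two-phase tokenization (split on 'AND' into a list, then a second loop splitting each part on 'OR' into an intermediate token list, then a separate validation loop) with a single left-to-right scanner that cuts a token at each literal 'AND'/'OR' occurrence and validates it immediately, building no intermediate lists.
import Mathlib
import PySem

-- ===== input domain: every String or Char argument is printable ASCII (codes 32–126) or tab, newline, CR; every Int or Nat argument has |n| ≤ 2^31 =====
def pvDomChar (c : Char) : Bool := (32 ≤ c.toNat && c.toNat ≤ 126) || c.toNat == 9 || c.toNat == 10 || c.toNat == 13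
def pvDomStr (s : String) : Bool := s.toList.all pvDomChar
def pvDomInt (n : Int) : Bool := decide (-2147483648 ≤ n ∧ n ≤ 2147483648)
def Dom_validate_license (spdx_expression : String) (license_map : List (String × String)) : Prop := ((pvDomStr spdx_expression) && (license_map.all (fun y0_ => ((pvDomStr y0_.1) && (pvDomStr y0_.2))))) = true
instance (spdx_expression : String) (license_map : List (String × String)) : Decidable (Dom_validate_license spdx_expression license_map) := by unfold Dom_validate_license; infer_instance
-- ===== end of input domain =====

-- B replaces A's two-phase split (split on 'AND', then split each part on 'OR' into an
-- intermediate token list, then a separate validation loop) with a single left-to-right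
-- scanner that cuts a token at each literal 'AND'/'OR' and validates it immediately
-- (objective: alternative single-pass decomposition, no intermediate lists).

-- ===== PORT A =====
-- the final `for spdx_id in removed_or_parts` loop with its early `return False`
def pvACheck (license_map : List (String × String)) : List (List Char) → Bool
  | [] => true
  | t :: ts =>
    if String.ofList t == "custom" then pvACheck license_map ts
    else if (license_map.any (fun kv => kv.1 == String.ofList t)) = false then false
    else pvACheck license_map ts

def validate_license (spdx_expression : String) (license_map : List (String × String)) : Bool :=
  let e := PySem.Str.replace (PySem.Str.replace spdx_expression "(" "") ")" ""
  let removed_and_parts := (PySem.Chars.splitOn e.toList ['A', 'N', 'D']).map PySem.Chars.strip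
  let removed_or_parts := removed_and_parts.foldl
    (fun acc part => acc ++ (PySem.Chars.splitOn part ['O', 'R']).map PySem.Chars.strip) []
  pvACheck license_map removed_or_parts

-- ===== PORT B =====
-- `tok != 'custom' and tok not in license_map` test, on the stripped token
def pvAltOk (license_map : List (String × String)) (cur : List Char) : Bool :=
  let t := PySem.Chars.strip cur
  (String.ofList t == "custom") || license_map.any (fun kv => kv.1 == String.ofList t)

-- the scanner loop: `cur` is the slice expr[tok_start:i], `cs` the rest of the string
def pvAltGo (license_map : List (String × String)) (cur cs : List Char) : Bool :=
  if h : (['A', 'N', 'D'].isPrefixOf cs) = true then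
    pvAltOk license_map cur && pvAltGo license_map [] (cs.drop 3)
  else if h2 : (['O', 'R'].isPrefixOf cs) = true then
    pvAltOk license_map cur && pvAltGo license_map [] (cs.drop 2)
  else
    match cs with
    | c :: rest => pvAltGo license_map (cur ++ [c]) rest
    | [] => pvAltOk license_map cur
termination_by cs.length
decreasing_by
  · have h3 : 3 ≤ cs.length := by simpa using (List.isPrefixOf_iff_prefix.mp h).length_le
    simp only [List.length_drop]; omega
  · have h3 : 2 ≤ cs.length := by simpa using (List.isPrefixOf_iff_prefix.mp h2).length_le
    simp only [List.length_drop]; omega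
  · simp only [List.length_cons]; omega

def validate_license_alt (spdx_expression : String) (license_map : List (String × String)) : Bool :=
  let e := PySem.Str.replace (PySem.Str.replace spdx_expression "(" "") ")" ""
  pvAltGo license_map [] e.toList

-- ===== PRECONDITION & SPEC =====
def Spec_validate_license (spdx_expression : String) (license_map : List (String × String)) (out : Bool) : Prop := out = validate_license_alt spdx_expression license_map
instance (spdx_expression : String) (license_map : List (String × String)) (out : Bool) : Decidable (Spec_validate_license spdx_expression license_map out) := by unfold Spec_validate_license; infer_instance

-- ===== CLAIM (what is proved, stated in full; the proofs are below) =====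
def Claim_equal_validate_license : Prop := ∀ (spdx_expression : String) (license_map : List (String × String)), Dom_validate_license spdx_expression license_map → Spec_validate_license spdx_expression license_map (validate_license spdx_expression license_map)

-- ===== LEMMAS AND PROOFS =====

-- prepend `p` to the first token
def pvPrep (p : List Char) : List (List Char) → List (List Char)
  | [] => [p]
  | t :: ts => (p ++ t) :: ts

-- structural (non-fuel) version of PySem.Chars.splitOn
def pvSplit (sep : List Char) (l : List Char) : List (List Char) :=
  match l with
  | [] => [[]]
  | c :: rest =>
    if h : sep ≠ [] ∧ sep.isPrefixOf (c :: rest) = true then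
      [] :: pvSplit sep ((c :: rest).drop sep.length)
    else
      pvPrep [c] (pvSplit sep rest)
termination_by l.length
decreasing_by
  · have hl : 0 < sep.length := List.length_pos_of_ne_nil h.1
    simp only [List.length_drop, List.length_cons]; omega
  · simp only [List.length_cons]; omega

-- the token list B's scanner cuts: split on leftmost 'AND'/'OR' ('AND' first)
def pvToks (l : List Char) : List (List Char) :=
  match l with
  | [] => [[]]
  | c :: rest =>
    if (['A', 'N', 'D'].isPrefixOf (c :: rest)) = true then
      [] :: pvToks ((c :: rest).drop 3)
    else if (['O', 'R'].isPrefixOf (c :: rest)) = true then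
      [] :: pvToks ((c :: rest).drop 2)
    else
      pvPrep [c] (pvToks rest)
termination_by l.length
decreasing_by all_goals (simp only [List.length_drop, List.length_cons]; omega)

-- append `w` to the last token
def pvAppLast (X : List (List Char)) (w : List Char) : List (List Char) :=
  match X with
  | [] => [w]
  | [t] => [t ++ w]
  | t :: ts => t :: pvAppLast ts w

lemma pvPrep_ne_nil (p : List Char) (X : List (List Char)) : pvPrep p X ≠ [] := by
  cases X <;> simp [pvPrep]

lemma pvPrep_nil (X : List (List Char)) (hX : X ≠ []) : pvPrep [] X = X := by
  cases X with
  | nil => exact absurd rfl hX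
  | cons t ts => simp [pvPrep]

lemma pvPrep_pvPrep (p q : List Char) (X : List (List Char)) :
    pvPrep p (pvPrep q X) = pvPrep (p ++ q) X := by
  cases X <;> simp [pvPrep]

lemma pvPrep_append (p : List Char) (X Y : List (List Char)) (hX : X ≠ []) :
    pvPrep p X ++ Y = pvPrep p (X ++ Y) := by
  cases X with
  | nil => exact absurd rfl hX
  | cons t ts => simp [pvPrep]

lemma pvAppLast_cons (t : List Char) (ts : List (List Char)) (w : List Char) (h : ts ≠ []) :
    pvAppLast (t :: ts) w = t :: pvAppLast ts w := by
  cases ts with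
  | nil => exact absurd rfl h
  | cons a b => rfl

lemma pvAppLast_pvPrep (p : List Char) (X : List (List Char)) (w : List Char) (hX : X ≠ []) :
    pvAppLast (pvPrep p X) w = pvPrep p (pvAppLast X w) := by
  cases X with
  | nil => exact absurd rfl hX
  | cons t ts =>
    cases ts with
    | nil => simp [pvPrep, pvAppLast]
    | cons a b => simp [pvPrep, pvAppLast_cons]

lemma pvSplit_cons_pos (sep : List Char) (c : Char) (rest : List Char)
    (hsep : sep ≠ []) (hp : sep.isPrefixOf (c :: rest) = true) :
    pvSplit sep (c :: rest) = [] :: pvSplit sep (List.drop sep.length (c :: rest)) := by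
  rw [pvSplit]; simp [hsep, hp]

lemma pvSplit_cons_neg (sep : List Char) (c : Char) (rest : List Char)
    (hp : ¬ sep.isPrefixOf (c :: rest) = true) :
    pvSplit sep (c :: rest) = pvPrep [c] (pvSplit sep rest) := by
  rw [pvSplit]; simp [hp]

lemma pvSplit_ne_nil (sep l : List Char) : pvSplit sep l ≠ [] := by
  cases l with
  | nil => simp [pvSplit]
  | cons c rest =>
    rw [pvSplit]
    split
    · simp
    · exact pvPrep_ne_nil _ _

lemma pvToks_ne_nil (l : List Char) : pvToks l ≠ [] := by
  cases l with
  | nil => simp [pvToks]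
  | cons c rest =>
    rw [pvToks]
    split
    · simp
    · split
      · simp
      · exact pvPrep_ne_nil _ _

lemma pvSplit_head_prefix (sep l : List Char) :
    ∃ t ts, pvSplit sep l = t :: ts ∧ t <+: l := by
  induction l using pvSplit.induct sep with
  | case1 => exact ⟨[], [], by simp [pvSplit], List.nil_prefix⟩
  | case2 c rest h ih =>
    refine ⟨[], pvSplit sep (List.drop sep.length (c :: rest)), ?_, List.nil_prefix⟩
    rw [pvSplit]; simp [h]
  | case3 c rest h ih =>
    obtain ⟨t, ts, heq, hpre⟩ := ih
    refine ⟨c :: t, ts, ?_, by simpa using hpre⟩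
    rw [pvSplit]; simp only [h]; rw [heq]; simp [pvPrep]

lemma pvSplit_go_spec (sep : List Char) (hsep : sep ≠ []) :
    ∀ fuel l cur acc, l.length < fuel →
      PySem.Chars.splitOn.go sep fuel l cur acc
        = acc.reverse ++ pvPrep cur.reverse (pvSplit sep l) := by
  intro fuel
  induction fuel with
  | zero => intro l cur acc h; omega
  | succ n ih =>
    intro l cur acc h
    cases l with
    | nil =>
      rw [PySem.Chars.splitOn.go]
      · simp [pvSplit, pvPrep]
      all_goals omega
    | cons c rest =>
      rw [PySem.Chars.splitOn.go]
      by_cases hp : sep.isPrefixOf (c :: rest) = true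
      · simp only [hp, if_pos]
        have hlen : 0 < sep.length := List.length_pos_of_ne_nil hsep
        rw [ih _ _ _ (by simp only [List.length_drop, List.length_cons] at *; omega)]
        rw [pvSplit]; simp only [hsep, hp, ne_eq, not_false_iff, and_self, dite_true]
        simp only [List.reverse_nil, List.reverse_cons, pvPrep]
        simp only [List.append_assoc, List.singleton_append, List.append_cancel_left_eq]
        cases hps : pvSplit sep (List.drop sep.length (c :: rest)) with
        | nil => exact absurd hps (pvSplit_ne_nil _ _)
        | cons a b => simp [pvPrep]
      · simp only [hp, if_neg, Bool.false_eq_true, not_false_iff]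
        rw [ih _ _ _ (by simp only [List.length_cons] at h; omega)]
        rw [pvSplit]
        have : ¬ (sep ≠ [] ∧ sep.isPrefixOf (c :: rest) = true) := by
          intro hc; exact hp hc.2
        simp only [this, dite_false]
        rw [pvPrep_pvPrep]
        simp [List.reverse_cons]

lemma splitOn_eq_pvSplit (l sep : List Char) (hsep : sep ≠ []) :
    PySem.Chars.splitOn l sep = pvSplit sep l := by
  rw [PySem.Chars.splitOn, pvSplit_go_spec sep hsep _ _ _ _ (by omega)]
  simp [pvPrep_nil _ (pvSplit_ne_nil _ _)]

lemma pvFlat (l : List Char) :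
    (pvSplit ['A','N','D'] l).flatMap (pvSplit ['O','R']) = pvToks l := by
  induction l using pvToks.induct with
  | case1 => simp [pvSplit, pvToks]
  | case2 c rest h ih =>
    rw [pvToks]; simp only [h, if_pos]
    rw [pvSplit]
    simp only [show (['A','N','D'] : List Char) ≠ [] from by simp, h, ne_eq,
      not_false_iff, and_self, dite_true]
    simp only [List.flatMap_cons]
    rw [show (['A','N','D'] : List Char).length = 3 from rfl, ih]
    simp [pvSplit]
  | case3 c rest h h2 ih =>
    -- OR is a prefix: c = 'O', rest = 'R' :: r2
    have hpre := List.isPrefixOf_iff_prefix.mp h2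
    obtain ⟨u, hu⟩ := hpre
    obtain ⟨rfl, hrest⟩ : c = 'O' ∧ rest = 'R' :: u := by
      cases hu; exact ⟨rfl, rfl⟩
    subst hrest
    rw [pvToks]; simp only [h, h2, if_pos, Bool.false_eq_true, if_neg, not_false_iff]
    obtain ⟨t, ts, heq, -⟩ := pvSplit_head_prefix ['A','N','D'] u
    have e1 : pvSplit ['A','N','D'] ('O' :: 'R' :: u) = ('O' :: 'R' :: t) :: ts := by
      rw [pvSplit]
      have : ¬ ((['A','N','D'] : List Char) ≠ [] ∧ ['A','N','D'].isPrefixOf ('O' :: 'R' :: u) = true) := by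
        simp [List.isPrefixOf]
      simp only [this, dite_false]
      rw [pvSplit]
      have : ¬ ((['A','N','D'] : List Char) ≠ [] ∧ ['A','N','D'].isPrefixOf ('R' :: u) = true) := by
        simp [List.isPrefixOf]
      simp only [this, dite_false]
      rw [heq]; simp [pvPrep]
    rw [e1]
    simp only [List.flatMap_cons]
    have e2 : pvSplit ['O','R'] ('O' :: 'R' :: t) = [] :: pvSplit ['O','R'] t := by
      rw [pvSplit]
      have : (['O','R'] : List Char) ≠ [] ∧ ['O','R'].isPrefixOf ('O' :: 'R' :: t) = true := by
        simp [List.isPrefixOf]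
      simp only [this, dite_true]
      simp
    rw [e2]
    have hd : List.drop 2 ('O' :: 'R' :: u) = u := rfl
    simp only [hd] at ih ⊢
    rw [← ih, heq]
    simp [List.flatMap_cons]
  | case4 c rest h h2 ih =>
    rw [pvToks]; simp only [h, h2, if_neg, Bool.false_eq_true, not_false_iff]
    obtain ⟨t, ts, heq, hpre⟩ := pvSplit_head_prefix ['A','N','D'] rest
    have e1 : pvSplit ['A','N','D'] (c :: rest) = (c :: t) :: ts := by
      rw [pvSplit]
      have : ¬ ((['A','N','D'] : List Char) ≠ [] ∧ ['A','N','D'].isPrefixOf (c :: rest) = true) := by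
        intro hc; exact h hc.2
      simp only [this, dite_false]
      rw [heq]; simp [pvPrep]
    rw [e1]
    simp only [List.flatMap_cons]
    have hnopre : ¬ (['O','R'].isPrefixOf (c :: t)) = true := by
      intro hc
      have := List.isPrefixOf_iff_prefix.mp hc
      obtain ⟨v, hv⟩ := this
      obtain ⟨rfl, ht⟩ : c = 'O' ∧ t = 'R' :: v := by cases hv; exact ⟨rfl, rfl⟩
      subst ht
      obtain ⟨w, hw⟩ := hpre
      apply h2
      apply List.isPrefixOf_iff_prefix.mpr
      exact ⟨v ++ w, by rw [← hw]; simp⟩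
    have e2 : pvSplit ['O','R'] (c :: t) = pvPrep [c] (pvSplit ['O','R'] t) := by
      rw [pvSplit]
      have : ¬ ((['O','R'] : List Char) ≠ [] ∧ ['O','R'].isPrefixOf (c :: t) = true) := by
        intro hc; exact hnopre hc.2
      simp only [this, dite_false]
    rw [e2, pvPrep_append _ _ _ (pvSplit_ne_nil _ _), ← List.flatMap_cons, ← heq, ih]

lemma strip_cons_space (c : Char) (x : List Char) (hc : PySem.Chars.isspace c = true) :
    PySem.Chars.strip (c :: x) = PySem.Chars.strip x := by
  simp [PySem.Chars.strip, PySem.Chars.lstrip, List.dropWhile_cons, hc]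

lemma pvS1 (t : List Char) :
    (pvSplit ['O','R'] (List.dropWhile PySem.Chars.isspace t)).map PySem.Chars.strip
      = (pvSplit ['O','R'] t).map PySem.Chars.strip := by
  induction t with
  | nil => rfl
  | cons c r ih =>
    by_cases hc : PySem.Chars.isspace c = true
    · rw [List.dropWhile_cons]
      simp only [hc, if_pos]
      rw [ih]
      have hnp : ¬ ((['O','R'] : List Char) ≠ [] ∧ ['O','R'].isPrefixOf (c :: r) = true) := by
        rintro ⟨-, hp⟩
        obtain ⟨v, hv⟩ := List.isPrefixOf_iff_prefix.mp hp
        have : c = 'O' := by cases hv; rfl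
        subst this
        simp [PySem.Chars.isspace] at hc
      conv_rhs => rw [pvSplit]
      simp only [hnp, dite_false]
      obtain ⟨t', ts', heq, -⟩ := pvSplit_head_prefix ['O','R'] r
      rw [heq]
      simp [pvPrep, strip_cons_space c _ hc]
    · rw [List.dropWhile_cons]
      simp [hc]

lemma pvAllSpace_split (w : List Char) (hw : ∀ c ∈ w, PySem.Chars.isspace c = true) :
    pvSplit ['O','R'] w = [w] := by
  induction w with
  | nil => simp [pvSplit]
  | cons c r ih =>
    rw [pvSplit]
    have hnp : ¬ ((['O','R'] : List Char) ≠ [] ∧ ['O','R'].isPrefixOf (c :: r) = true) := by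
      rintro ⟨-, hp⟩
      obtain ⟨v, hv⟩ := List.isPrefixOf_iff_prefix.mp hp
      have : c = 'O' := by cases hv; rfl
      subst this
      have := hw 'O' (by simp)
      simp [PySem.Chars.isspace] at this
    simp only [hnp, dite_false]
    rw [ih (fun c hc => hw c (by simp [hc]))]
    simp [pvPrep]

lemma pvT (w : List Char) (hw : ∀ c ∈ w, PySem.Chars.isspace c = true) :
    ∀ a, pvSplit ['O','R'] (a ++ w) = pvAppLast (pvSplit ['O','R'] a) w := by
  intro a
  induction a using pvSplit.induct ['O','R'] with
  | case1 =>
    simp only [List.nil_append]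
    rw [pvAllSpace_split w hw]
    simp [pvSplit, pvAppLast]
  | case2 c rest h ih =>
    obtain ⟨-, hp⟩ := h
    have hlen : 2 ≤ (c :: rest).length := by
      simpa using (List.isPrefixOf_iff_prefix.mp hp).length_le
    obtain ⟨v, hv⟩ := List.isPrefixOf_iff_prefix.mp hp
    have hp2 : (['O','R'] : List Char).isPrefixOf (c :: (rest ++ w)) = true := by
      apply List.isPrefixOf_iff_prefix.mpr
      exact ⟨v ++ w, by rw [show (c :: (rest ++ w)) = (c :: rest) ++ w from rfl, ← hv]; simp⟩
    rw [show (c :: rest) ++ w = c :: (rest ++ w) from rfl]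
    rw [pvSplit_cons_pos _ _ _ (by simp) hp2]
    rw [pvSplit_cons_pos _ _ _ (by simp) hp]
    simp only [show (['O','R'] : List Char).length = 2 from rfl]
    have e1 : List.drop 2 (c :: (rest ++ w)) = List.drop 2 (c :: rest) ++ w := by
      rw [show (c :: (rest ++ w)) = (c :: rest) ++ w from rfl]
      exact List.drop_append_of_le_length hlen
    rw [e1]
    simp only [show (['O','R'] : List Char).length = 2 from rfl] at ih
    rw [ih, pvAppLast_cons _ _ _ (pvSplit_ne_nil _ _)]
  | case3 c rest h ih =>
    have hnp : ¬ ((['O','R'] : List Char).isPrefixOf (c :: rest) = true) := by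
      intro hp; exact h ⟨by simp, hp⟩
    have hnp2 : ¬ ((['O','R'] : List Char).isPrefixOf (c :: (rest ++ w)) = true) := by
      intro hc
      obtain ⟨v, hv⟩ := List.isPrefixOf_iff_prefix.mp hc
      have hv' : 'O' :: 'R' :: v = c :: (rest ++ w) := hv
      have hc2 : c = 'O' := by injection hv' with h1 h2; exact h1.symm
      have hrw : rest ++ w = 'R' :: v := by injection hv' with h1 h2; exact h2.symm
      cases rest with
      | nil =>
        simp only [List.nil_append] at hrw
        have : PySem.Chars.isspace 'R' = true := hw 'R' (by rw [hrw]; simp)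
        simp [PySem.Chars.isspace] at this
      | cons r1 r2 =>
        have hr1 : r1 = 'R' := by
          have := congrArg (fun l => l.head?) hrw
          simpa using this
        apply hnp
        subst hc2 hr1
        simp [List.isPrefixOf]
    rw [show (c :: rest) ++ w = c :: (rest ++ w) from rfl]
    rw [pvSplit_cons_neg _ _ _ hnp2, ih, pvSplit_cons_neg _ _ _ hnp]
    rw [pvAppLast_pvPrep _ _ _ (pvSplit_ne_nil _ _)]

lemma pvRstripAppend (x w : List Char) (hw : ∀ c ∈ w, PySem.Chars.isspace c = true) :
    PySem.Chars.rstrip (x ++ w) = PySem.Chars.rstrip x := by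
  simp only [PySem.Chars.rstrip, List.reverse_append]
  have hwz : List.dropWhile PySem.Chars.isspace w.reverse = [] := by
    rw [List.dropWhile_eq_nil_iff]
    intro c hc; exact hw c (List.mem_reverse.mp hc)
  rw [List.dropWhile_append, hwz]
  simp

lemma pvW (t w : List Char) (hw : ∀ c ∈ w, PySem.Chars.isspace c = true) :
    PySem.Chars.strip (t ++ w) = PySem.Chars.strip t := by
  simp only [PySem.Chars.strip, PySem.Chars.lstrip]
  by_cases hd : List.dropWhile PySem.Chars.isspace t = []
  · have h2 : List.dropWhile PySem.Chars.isspace (t ++ w) = [] := by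
      rw [List.dropWhile_eq_nil_iff]
      intro c hc
      rcases List.mem_append.mp hc with hct | hcw
      · exact List.dropWhile_eq_nil_iff.mp hd c hct
      · exact hw c hcw
    rw [hd, h2]
  · rw [List.dropWhile_append]
    simp only [List.isEmpty_iff, hd, if_false]
    exact pvRstripAppend _ _ hw

lemma pvU (X : List (List Char)) (hX : X ≠ []) (w : List Char)
    (hw : ∀ c ∈ w, PySem.Chars.isspace c = true) :
    (pvAppLast X w).map PySem.Chars.strip = X.map PySem.Chars.strip := by
  induction X with
  | nil => exact absurd rfl hX
  | cons t ts ih =>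
    cases ts with
    | nil => simp [pvAppLast, pvW t w hw]
    | cons a b =>
      rw [pvAppLast_cons _ _ _ (by simp)]
      simp only [List.map_cons]
      rw [ih (by simp)]
      simp

lemma pvS2 (u : List Char) :
    (pvSplit ['O','R'] (PySem.Chars.rstrip u)).map PySem.Chars.strip
      = (pvSplit ['O','R'] u).map PySem.Chars.strip := by
  have hdecomp : u = PySem.Chars.rstrip u ++ (List.takeWhile PySem.Chars.isspace u.reverse).reverse := by
    rw [PySem.Chars.rstrip]
    conv_lhs => rw [← u.reverse_reverse, ← List.takeWhile_append_dropWhile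
      (p := PySem.Chars.isspace) (l := u.reverse)]
    rw [List.reverse_append]
  have hw : ∀ c ∈ (List.takeWhile PySem.Chars.isspace u.reverse).reverse,
      PySem.Chars.isspace c = true := by
    intro c hc
    exact List.mem_takeWhile_imp (List.mem_reverse.mp hc)
  conv_rhs => rw [hdecomp]
  rw [pvT _ hw (PySem.Chars.rstrip u)]
  exact (pvU _ (pvSplit_ne_nil _ _) _ hw).symm

lemma pvStripMap (t : List Char) :
    (pvSplit ['O','R'] (PySem.Chars.strip t)).map PySem.Chars.strip
      = (pvSplit ['O','R'] t).map PySem.Chars.strip := by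
  rw [PySem.Chars.strip, PySem.Chars.lstrip, pvS2, pvS1]

lemma pvToks_and (v : List Char) : pvToks ('A' :: 'N' :: 'D' :: v) = [] :: pvToks v := by
  rw [pvToks]; simp [List.isPrefixOf]

lemma pvToks_or (v : List Char) : pvToks ('O' :: 'R' :: v) = [] :: pvToks v := by
  rw [pvToks]; simp [List.isPrefixOf]

lemma pvToks_cons (c : Char) (rest : List Char)
    (h1 : ¬ (['A','N','D'] : List Char).isPrefixOf (c :: rest) = true)
    (h2 : ¬ (['O','R'] : List Char).isPrefixOf (c :: rest) = true) :
    pvToks (c :: rest) = pvPrep [c] (pvToks rest) := by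
  rw [pvToks]; simp [h1, h2]

lemma pvAltGo_spec (m : List (String × String)) :
    ∀ cur cs, pvAltGo m cur cs = (pvPrep cur (pvToks cs)).all (pvAltOk m) := by
  intro cur cs
  induction cur, cs using pvAltGo.induct with
  | case1 cur cs h ih =>
    obtain ⟨v, hv⟩ := List.isPrefixOf_iff_prefix.mp h
    have hcs : cs = 'A' :: 'N' :: 'D' :: v := hv.symm
    subst hcs
    rw [pvAltGo]
    simp only [h, dite_true]
    rw [ih, pvToks_and]
    rw [pvPrep_nil _ (pvToks_ne_nil _)]
    simp [pvPrep, List.all_cons]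
  | case2 cur cs h h2 ih =>
    obtain ⟨v, hv⟩ := List.isPrefixOf_iff_prefix.mp h2
    have hcs : cs = 'O' :: 'R' :: v := hv.symm
    subst hcs
    rw [pvAltGo]
    simp only [h, h2, dite_true, dite_false]
    rw [ih, pvToks_or]
    rw [pvPrep_nil _ (pvToks_ne_nil _)]
    simp [pvPrep, List.all_cons]
  | case3 cur c rest h h2 ih =>
    rw [pvAltGo]
    simp only [h, h2, Bool.false_eq_true, dite_false]
    rw [ih, pvToks_cons c rest h h2, pvPrep_pvPrep]
  | case4 cur h h2 =>
    rw [pvAltGo]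
    simp only [h, h2, Bool.false_eq_true, dite_false]
    simp [pvToks, pvPrep, pvAltOk]

lemma pvACheck_eq_all (m : List (String × String)) (ts : List (List Char)) :
    pvACheck m ts = ts.all (fun t =>
      (String.ofList t == "custom") || m.any (fun kv => kv.1 == String.ofList t)) := by
  induction ts with
  | nil => rfl
  | cons t ts ih =>
    rw [pvACheck]
    by_cases hA : (String.ofList t == "custom") = true
    · simp [hA, ih]
    · cases hM : (m.any fun kv => kv.1 == String.ofList t) <;>
        simp [hA, hM, ih]

lemma pvFoldlApp (f : List Char → List (List Char)) :
    ∀ (l : List (List Char)) (init : List (List Char)),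
      List.foldl (fun acc p => acc ++ f p) init l = init ++ l.flatMap f := by
  intro l
  induction l with
  | nil => intro init; simp
  | cons t ts ih => intro init; simp [List.foldl_cons, ih, List.flatMap_cons]

lemma pvInner (L : List (List Char)) :
    L.flatMap (fun t => (pvSplit ['O','R'] (PySem.Chars.strip t)).map PySem.Chars.strip)
      = (L.flatMap (pvSplit ['O','R'])).map PySem.Chars.strip := by
  induction L with
  | nil => rfl
  | cons t ts ih =>
    simp only [List.flatMap_cons, List.map_append, ih, pvStripMap t]

lemma pvMain (m : List (String × String)) (x : List Char) :
    pvACheck m (((PySem.Chars.splitOn x ['A','N','D']).map PySem.Chars.strip).foldl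
        (fun acc part => acc ++ (PySem.Chars.splitOn part ['O','R']).map PySem.Chars.strip) [])
      = pvAltGo m [] x := by
  rw [pvFoldlApp]
  simp only [List.nil_append]
  simp only [show ∀ l, PySem.Chars.splitOn l ['O','R'] = pvSplit ['O','R'] l from
    fun l => splitOn_eq_pvSplit l _ (by simp)]
  rw [splitOn_eq_pvSplit _ _ (by simp)]
  rw [List.flatMap_map]
  rw [pvInner, pvFlat]
  rw [pvACheck_eq_all, List.all_map]
  rw [pvAltGo_spec m [] x, pvPrep_nil _ (pvToks_ne_nil _)]
  rfl

-- ===== VERDICT (by name: the statement is the Claim_ definition above) =====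
theorem validate_license_spec : Claim_equal_validate_license := by
  intro s m _
  unfold Spec_validate_license validate_license validate_license_alt
  exact pvMain m (PySem.Str.replace (PySem.Str.replace s "(" "") ")" "").toList
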